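-- pv_equiv track=rewrite | github.com/thelaycon/webkage | router.py | path_to_regex
-- ===== SOURCE A (Python) =====
-- def path_to_regex(path):
--     path_segments = path.split("/")
--     params = dict()
--     for index, segment in enumerate(path_segments):
--         if segment == ":id":
--             path_segments[index] = "[0-9]+"
--         elif segment == ":slug":
--             path_segments[index] = "[a-zA-Z]+(?:-[a-zA-Z]+)*"
--     path = "/".join(path_segments) + "$"
--     return path
-- ===== SOURCE B (Python) =====
-- def _sub(seg):
--     if seg == ":id":
--         return "[0-9]+"
--     if seg == ":slug":
--         return "[a-zA-Z]+(?:-[a-zA-Z]+)*"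
--     return seg
--
--
-- def path_to_regex(path):
--     # single pass over the characters: no split list, no index bookkeeping, no join
--     res = []
--     seg = ""
--     for ch in path:
--         if ch == "/":
--             res.append(_sub(seg))
--             res.append("/")
--             seg = ""
--         else:
--             seg = seg + ch
--     res.append(_sub(seg))
--     res.append("$")
--     return "".join(res)
-- ===== Notes on version B (the rewrite author's own statement) =====
-- stated objective: alternative
-- what changed: Replaces split/enumerate-with-index-mutation/join by a single character scan that accumulates the current segment and emits its replacement at each separator boundary, building the result directly.
import Mathlib
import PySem

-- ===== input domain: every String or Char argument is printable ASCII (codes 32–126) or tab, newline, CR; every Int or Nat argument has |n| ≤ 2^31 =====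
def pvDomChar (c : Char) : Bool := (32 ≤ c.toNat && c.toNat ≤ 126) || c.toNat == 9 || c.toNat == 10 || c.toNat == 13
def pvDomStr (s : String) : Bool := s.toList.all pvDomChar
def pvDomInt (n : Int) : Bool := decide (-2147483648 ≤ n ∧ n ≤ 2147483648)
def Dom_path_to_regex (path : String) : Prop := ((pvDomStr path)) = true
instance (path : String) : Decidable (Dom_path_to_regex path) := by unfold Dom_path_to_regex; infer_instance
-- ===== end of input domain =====

-- B is an alternative single-pass scan: same O(n) cost, no split list / index mutation / join.

-- ===== PORT A =====
-- split on "/", replace ':id' / ':slug' segments in place by index, join with "/", append "$"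
def path_to_regex (path : String) : String :=
  String.ofList (PySem.Chars.join ['/']
    ((PySem.List.enumerate (PySem.Chars.splitOn path.toList ['/'])).foldl
      (fun acc (p : Int × List Char) =>
        if p.2 = ":id".toList then PySem.List.pySetD acc p.1 "[0-9]+".toList
        else if p.2 = ":slug".toList then PySem.List.pySetD acc p.1 "[a-zA-Z]+(?:-[a-zA-Z]+)*".toList
        else acc) (PySem.Chars.splitOn path.toList ['/'])) ++ ['$'])

-- ===== PORT B =====
-- _sub from Source B
def pvSub (seg : List Char) : List Char :=
  if seg = ":id".toList then "[0-9]+".toList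
  else if seg = ":slug".toList then "[a-zA-Z]+(?:-[a-zA-Z]+)*".toList
  else seg

-- the single character-scan loop of Source B: `seg` is the segment accumulated so far,
-- emitted pieces are concatenated in order (res.append … / "".join(res))
def pvScan : List Char → List Char → List Char
  | [], seg => pvSub seg ++ ['$']
  | c :: rest, seg =>
    if c = '/' then pvSub seg ++ '/' :: pvScan rest []
    else pvScan rest (seg ++ [c])

def path_to_regex_alt (path : String) : String :=
  String.ofList (pvScan path.toList [])

-- ===== PRECONDITION & SPEC =====
def Spec_path_to_regex (path : String) (out : String) : Prop := out = path_to_regex_alt path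
instance (path : String) (out : String) : Decidable (Spec_path_to_regex path out) := by unfold Spec_path_to_regex; infer_instance

-- ===== CLAIM (what is proved, stated in full; the proofs are below) =====
def Claim_equal_path_to_regex : Prop := ∀ (path : String), Dom_path_to_regex path → Spec_path_to_regex path (path_to_regex path)

-- ===== LEMMAS AND PROOFS =====

-- proof-side structural characterisation of splitting on '/'
def pvSplit : List Char → List (List Char)
  | [] => [[]]
  | c :: cs => if c = '/' then [] :: pvSplit cs else (pvSplit cs).modifyHead (c :: ·)

theorem pvSplit_ne_nil (cs : List Char) : pvSplit cs ≠ [] := by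
  induction cs with
  | nil => simp [pvSplit]
  | cons c cs ih =>
    simp only [pvSplit]
    split_ifs
    · simp
    · cases h : pvSplit cs with
      | nil => exact absurd h ih
      | cons a l => simp [List.modifyHead]

theorem pvSplitOn_go (fuel : Nat) : ∀ (l cur : List Char) (acc : List (List Char)),
    l.length < fuel →
    PySem.Chars.splitOn.go ['/'] fuel l cur acc
      = acc.reverse ++ (pvSplit l).modifyHead (cur.reverse ++ ·) := by
  induction fuel with
  | zero => intro l cur acc h; omega
  | succ fuel ih =>
    intro l cur acc h
    cases l with
    | nil => simp [PySem.Chars.splitOn.go, pvSplit]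
    | cons c rest =>
      by_cases hc : c = '/'
      · subst hc
        have : (['/'] : List Char).isPrefixOf ('/' :: rest) = true := by
          simp [List.isPrefixOf]
        rw [PySem.Chars.splitOn.go]
        simp only [this, if_pos]
        show PySem.Chars.splitOn.go ['/'] fuel rest [] (cur.reverse :: acc) = _
        rw [ih rest [] (cur.reverse :: acc) (by simpa using Nat.lt_of_succ_lt_succ h)]
        simp only [pvSplit, List.reverse_cons, List.append_assoc, List.singleton_append]
        cases pvSplit rest <;> simp
      · have hp : ¬ ((['/'] : List Char).isPrefixOf (c :: rest) = true) := by
          simp only [List.isPrefixOf, Bool.and_true, beq_iff_eq]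
          exact fun he => hc he.symm
        rw [PySem.Chars.splitOn.go]
        rw [if_neg hp]
        rw [ih rest (c :: cur) acc (by simpa using Nat.lt_of_succ_lt_succ h)]
        simp only [pvSplit, if_neg hc, List.modifyHead_modifyHead]
        congr 1
        cases hs : pvSplit rest with
        | nil => exact absurd hs (pvSplit_ne_nil rest)
        | cons a l => simp [List.modifyHead]

theorem pvSplitOn_eq (cs : List Char) :
    PySem.Chars.splitOn cs ['/'] = pvSplit cs := by
  rw [PySem.Chars.splitOn, pvSplitOn_go (cs.length + 1) cs [] [] (by omega)]
  cases hs : pvSplit cs with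
  | nil => exact absurd hs (pvSplit_ne_nil cs)
  | cons a l => simp [List.modifyHead]

-- the enumerate/set-in-place fold of A is a map of pvSub
theorem pvFold_eq_map : ∀ (l pre : List (List Char)),
    (PySem.List.enumerate l (pre.length : Int)).foldl
      (fun acc (p : Int × List Char) =>
        if p.2 = ":id".toList then PySem.List.pySetD acc p.1 "[0-9]+".toList
        else if p.2 = ":slug".toList then PySem.List.pySetD acc p.1 "[a-zA-Z]+(?:-[a-zA-Z]+)*".toList
        else acc) (pre ++ l)
      = pre ++ l.map pvSub := by
  intro l
  induction l with
  | nil => intro pre; simp [PySem.List.enumerate]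
  | cons x xs ih =>
    intro pre
    rw [PySem.List.enumerate_cons, List.foldl_cons]
    have hstep :
        (if x = ":id".toList then PySem.List.pySetD (pre ++ x :: xs) (pre.length : Int) "[0-9]+".toList
         else if x = ":slug".toList then PySem.List.pySetD (pre ++ x :: xs) (pre.length : Int) "[a-zA-Z]+(?:-[a-zA-Z]+)*".toList
         else pre ++ x :: xs) = (pre ++ [pvSub x]) ++ xs := by
      unfold pvSub
      split_ifs <;> simp [PySem.List.pySetD_natCast, List.set_append_right]
    simp only [hstep]
    have hlen : (pre.length : Int) + 1 = ((pre ++ [pvSub x]).length : Int) := by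
      simp
    rw [hlen, ih (pre ++ [pvSub x])]
    simp

-- B's scan computes join of the mapped split
theorem pvScan_eq : ∀ (cs seg : List Char),
    pvScan cs seg
      = PySem.Chars.join ['/'] (((pvSplit cs).modifyHead (seg ++ ·)).map pvSub) ++ ['$'] := by
  intro cs
  induction cs with
  | nil => intro seg; simp [pvScan, pvSplit, PySem.Chars.join, List.intercalate]
  | cons c rest ih =>
    intro seg
    by_cases hc : c = '/'
    · subst hc
      simp only [pvScan, pvSplit, if_pos]
      rw [ih []]
      cases hs : pvSplit rest with
      | nil => exact absurd hs (pvSplit_ne_nil rest)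
      | cons a l =>
        simp [PySem.Chars.join, List.intercalate, List.modifyHead]
    · simp only [pvScan, pvSplit, if_neg hc]
      rw [ih (seg ++ [c]), List.modifyHead_modifyHead]
      congr 3
      cases hs : pvSplit rest with
      | nil => exact absurd hs (pvSplit_ne_nil rest)
      | cons a l => simp [List.modifyHead]

-- ===== VERDICT (by name: the statement is the Claim_ definition above) =====
theorem path_to_regex_spec : Claim_equal_path_to_regex := by
  intro path _
  unfold Spec_path_to_regex path_to_regex path_to_regex_alt
  rw [pvScan_eq path.toList []]
  rw [pvSplitOn_eq]
  have := pvFold_eq_map (pvSplit path.toList) []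
  simp only [List.nil_append, List.length_nil, Nat.cast_zero] at this
  rw [this]
  cases hs : pvSplit path.toList with
  | nil => exact absurd hs (pvSplit_ne_nil path.toList)
  | cons a l => simp [List.modifyHead]
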